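-- pv_equiv track=rewrite | github.com/christopherlawlee/UXG-PDW-File-Generator | Pdw.py | byte_array
-- ===== SOURCE A (Python) =====
-- def byte_array(bin_word_str):
--     ''' This function breaks a binary word string up into a list of bytes. '''
--
--     byte = ''
--     result = []
--
--     try:
--         for idx, bit in enumerate(bin_word_str):
--             byte = byte + bit
--             if idx % 8 == 7:
--                 result.append(byte) # append byte to list
--                 byte = ''
--     except Exception:
--         raise
--     else:
--         return result
-- ===== SOURCE B (Python) =====
-- def byte_array(bin_word_str):
--     ''' Stride-8 slice comprehension over the whole-byte prefix. '''
--     return [bin_word_str[i:i + 8] for i in range(0, len(bin_word_str) // 8 * 8, 8)]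
-- ===== Notes on version B (the rewrite author's own statement) =====
-- stated objective: simpler
-- what changed: Replaced the per-character accumulator with a modular index counter by a stride-8 slice comprehension over the whole-byte prefix.
import Mathlib
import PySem

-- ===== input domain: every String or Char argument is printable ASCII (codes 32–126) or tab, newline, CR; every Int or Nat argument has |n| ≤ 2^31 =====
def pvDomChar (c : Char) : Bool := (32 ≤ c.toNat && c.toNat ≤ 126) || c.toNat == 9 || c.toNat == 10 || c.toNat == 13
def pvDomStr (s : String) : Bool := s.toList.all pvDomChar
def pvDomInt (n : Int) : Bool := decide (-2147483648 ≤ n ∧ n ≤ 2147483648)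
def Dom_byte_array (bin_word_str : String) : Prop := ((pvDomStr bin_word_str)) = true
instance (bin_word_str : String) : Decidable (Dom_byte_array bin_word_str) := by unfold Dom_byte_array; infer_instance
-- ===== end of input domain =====

-- B replaces A's per-character accumulator with modular counter by a stride-8 slice comprehension (objective: simpler).

-- ===== PORT A =====
-- one step of A's loop body: byte = byte + bit; if idx % 8 == 7: result.append(byte); byte = ''
def byteArrayStep (st : List Char × List String) (p : Int × Char) : List Char × List String :=
  let byte := st.1 ++ [p.2]
  if PySem.Int.mod p.1 8 == 7 then ([], st.2 ++ [String.mk byte]) else (byte, st.2)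

def byte_array (bin_word_str : String) : List String :=
  ((PySem.List.enumerate bin_word_str.toList 0).foldl byteArrayStep ([], [])).2

-- ===== PORT B =====
-- [bin_word_str[i:i+8] for i in range(0, len(bin_word_str) // 8 * 8, 8)]
def byte_array_alt (bin_word_str : String) : List String :=
  (PySem.List.pyRange 0 (PySem.Int.floordiv (bin_word_str.toList.length : Int) 8 * 8) 8).map
    (fun i => String.mk (PySem.List.slice bin_word_str.toList (some i) (some (i + 8))))

-- ===== PRECONDITION & SPEC =====
def Spec_byte_array (bin_word_str : String) (out : List String) : Prop := out = byte_array_alt bin_word_str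
instance (bin_word_str : String) (out : List String) : Decidable (Spec_byte_array bin_word_str out) := by unfold Spec_byte_array; infer_instance

-- ===== CLAIM (what is proved, stated in full; the proofs are below) =====
def Claim_equal_byte_array : Prop := ∀ (bin_word_str : String), Dom_byte_array bin_word_str → Spec_byte_array bin_word_str (byte_array bin_word_str)

-- ===== LEMMAS AND PROOFS =====

-- proof-side normal form: the list of complete 8-char chunks
def byteChunks (l : List Char) : List String :=
  if l.length < 8 then []
  else String.mk (l.take 8) :: byteChunks (l.drop 8)
termination_by l.length
decreasing_by simp only [List.length_drop]; omega

theorem byteChunks_unfold (l : List Char) :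
    byteChunks l = if l.length < 8 then [] else String.mk (l.take 8) :: byteChunks (l.drop 8) := by
  rw [byteChunks]

theorem byteChunks_short (l : List Char) (h : l.length < 8) : byteChunks l = [] := by
  rw [byteChunks]; simp [h]

-- A's fold with the loop invariant: index ≡ accumulated-byte length (mod 8)
theorem fold_enum_eq (l : List Char) : ∀ (b : List Char) (acc : List String) (n : Int),
    0 ≤ n → n % 8 = (b.length : Int) → b.length < 8 →
    ((PySem.List.enumerate l n).foldl byteArrayStep (b, acc)).2 = acc ++ byteChunks (b ++ l) := by
  induction l with
  | nil =>
    intro b acc n _ _ hb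
    simp [PySem.List.enumerate_nil, byteChunks_short _ (by simpa using hb)]
  | cons h t ih =>
    intro b acc n hn hmod hb
    rw [PySem.List.enumerate_cons, List.foldl_cons]
    have hmod8 : PySem.Int.mod n 8 = n % 8 := PySem.Int.mod_eq_emod_of_pos (by norm_num)
    by_cases h7 : b.length = 7
    · have hcond : (PySem.Int.mod n 8 == 7) = true := by
        simp [hmod, h7]
      rw [byteArrayStep]
      simp only [hcond, if_true]
      rw [ih [] (acc ++ [String.mk (b ++ [h])]) (n + 1) (by omega)
        (by simp only [List.length_nil, Nat.cast_zero]; omega) (by norm_num)]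
      rw [byteChunks_unfold (b ++ h :: t)]
      have hlen : (b ++ h :: t).length = 8 + t.length := by simp [h7]; omega
      rw [if_neg (by omega)]
      have htake : (b ++ h :: t).take 8 = b ++ [h] := by
        have : b ++ h :: t = (b ++ [h]) ++ t := by simp
        rw [this, List.take_append_of_le_length (by simp [h7])]
        simp [h7]
      have hdrop : (b ++ h :: t).drop 8 = t := by
        have : b ++ h :: t = (b ++ [h]) ++ t := by simp
        rw [this, List.drop_append_of_le_length (by simp [h7])]
        simp [h7]
      rw [htake, hdrop]
      simp
    · have hcond : (PySem.Int.mod n 8 == 7) = false := by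
        simp [hmod]; omega
      rw [byteArrayStep]
      simp only [hcond, Bool.false_eq_true, if_false]
      rw [ih (b ++ [h]) acc (n + 1) (by omega) (by simp; omega) (by simp; omega)]
      simp

-- range(0, m*8, 8) is [8*0, 8*1, …, 8*(m-1)]
theorem pyRange_eight (m : Nat) :
    PySem.List.pyRange 0 ((m : Int) * 8) 8 = (List.range m).map (fun k => ((8 * k : Nat) : Int)) := by
  rw [PySem.List.pyRange_of_pos _ _ (by norm_num)]
  rcases Nat.eq_zero_or_pos m with hm | hm
  · simp [hm]
  · rw [if_pos (by exact_mod_cast Nat.mul_pos hm (by norm_num))]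
    have hcnt : (((m : Int) * 8 - 0 + 8 - 1) / 8).toNat = m := by omega
    rw [hcnt]
    apply List.map_congr_left
    intro k _
    push_cast
    ring

-- the comprehension body at index 8*k is the k-th chunk
theorem chunks_eq_map (m : Nat) : ∀ (l : List Char), m = l.length / 8 →
    (List.range m).map (fun k => String.mk ((l.drop (8 * k)).take 8)) = byteChunks l := by
  induction m with
  | zero =>
    intro l hm
    rw [byteChunks_short l (by omega)]
    simp
  | succ m ih =>
    intro l hm
    have h8 : 8 ≤ l.length := by omega
    rw [byteChunks_unfold l, if_neg (by omega)]
    rw [List.range_succ_eq_map, List.map_cons, List.map_map]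
    simp only [Nat.mul_zero, List.drop_zero]
    congr 1
    rw [← ih (l.drop 8) (by simp; omega)]
    apply List.map_congr_left
    intro k _
    simp [List.drop_drop]
    ring_nf

-- ===== VERDICT (by name: the statement is the Claim_ definition above) =====
theorem byte_array_spec : Claim_equal_byte_array := by
  intro s _
  unfold Spec_byte_array byte_array byte_array_alt
  rw [fold_enum_eq s.toList [] [] 0 (by norm_num) (by simp) (by norm_num)]
  rw [PySem.Int.floordiv_eq_ediv_of_pos (by norm_num)]
  have hdiv : (s.toList.length : Int) / 8 = ((s.toList.length / 8 : Nat) : Int) := by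
    omega
  rw [hdiv, pyRange_eight, List.map_map]
  rw [List.nil_append, List.nil_append, ← chunks_eq_map _ s.toList rfl]
  apply List.map_congr_left
  intro k _
  simp only [Function.comp]
  rw [PySem.List.slice_toNat _ (by positivity) (by positivity)]
  have h1 : ((8 * k : Nat) : Int).toNat = 8 * k := by omega
  have h2 : (((8 * k : Nat) : Int) + 8).toNat = 8 * k + 8 := by omega
  rw [h1, h2]
  norm_num
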